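-- pv_equiv track=rewrite | github.com/Kris465/MemoryBox | old_projects/RPO/block11/task148.py | swap_first_neg_last_pos
-- ===== SOURCE A (Python) =====
-- def swap_first_neg_last_pos(arr):
--     first_neg = None
--     for i in range(len(arr)):
--         if arr[i] < 0:
--             first_neg = i
--             break
--
--     last_pos = None
--     for i in range(len(arr)-1, -1, -1):
--         if arr[i] > 0:
--             last_pos = i
--             break
--
--     if first_neg is not None and last_pos is not None:
--         arr[first_neg], arr[last_pos] = arr[last_pos], arr[first_neg]
--         return True
--     else:
--         return False
-- ===== SOURCE B (Python) =====
-- def swap_first_neg_last_pos(arr):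
--     first_neg = None
--     last_pos = None
--     for i, x in enumerate(arr):
--         if x < 0 and first_neg is None:
--             first_neg = i
--         if x > 0:
--             last_pos = i
--     if first_neg is not None and last_pos is not None:
--         arr[first_neg], arr[last_pos] = arr[last_pos], arr[first_neg]
--         return True
--     else:
--         return False
-- ===== Notes on version B (the rewrite author's own statement) =====
-- stated objective: alternative
-- what changed: Both target indices are found in a single forward pass over enumerate(arr) (first negative kept by a None-guard, last positive by overwriting), replacing A's forward scan plus separate backward scan.
import Mathlib
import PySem

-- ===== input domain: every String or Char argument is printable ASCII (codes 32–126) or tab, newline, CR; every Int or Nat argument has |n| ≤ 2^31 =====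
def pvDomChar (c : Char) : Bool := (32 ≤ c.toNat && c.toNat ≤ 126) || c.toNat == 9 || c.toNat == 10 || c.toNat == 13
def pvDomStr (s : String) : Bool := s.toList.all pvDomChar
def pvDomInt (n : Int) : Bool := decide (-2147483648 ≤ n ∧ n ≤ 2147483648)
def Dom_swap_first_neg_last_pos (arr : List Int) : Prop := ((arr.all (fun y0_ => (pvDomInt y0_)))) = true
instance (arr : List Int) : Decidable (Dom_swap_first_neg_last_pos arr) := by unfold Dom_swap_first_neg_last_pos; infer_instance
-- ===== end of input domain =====

-- B finds both indices in ONE forward pass (None-guard for first negative, overwrite for last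
-- positive) instead of A's forward-then-backward two scans; both Pythons perform the identical
-- in-place swap, the equivalence proved here is about the returned Bool.

-- ===== PORT A =====
-- forward loop: for i in range(len(arr)): if arr[i] < 0: first_neg = i; break
def pvFirstNeg (arr : List Int) (i : Nat) : Option Nat :=
  if h : i < arr.length then
    if arr[i] < 0 then some i else pvFirstNeg arr (i + 1)
  else none
termination_by arr.length - i

-- backward loop: for i in range(len(arr)-1, -1, -1): if arr[i] > 0: last_pos = i; break
-- (argument j is index+1; called with arr.length)
def pvLastPos (arr : List Int) : Nat → Option Nat
  | 0 => none
  | j + 1 => if arr[j]! > 0 then some j else pvLastPos arr j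

def swap_first_neg_last_pos (arr : List Int) : Bool :=
  let first_neg := pvFirstNeg arr 0
  let last_pos := pvLastPos arr arr.length
  first_neg.isSome && last_pos.isSome

-- ===== PORT B =====
def pvStep (st : Option Int × Option Int) (p : Int × Int) : Option Int × Option Int :=
  let fn := if p.2 < 0 && st.1.isNone then some p.1 else st.1
  let lp := if p.2 > 0 then some p.1 else st.2
  (fn, lp)

def swap_first_neg_last_pos_alt (arr : List Int) : Bool :=
  let st := (PySem.List.enumerate arr 0).foldl pvStep (none, none)
  st.1.isSome && st.2.isSome

-- ===== PRECONDITION & SPEC =====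
def Spec_swap_first_neg_last_pos (arr : List Int) (out : Bool) : Prop := out = swap_first_neg_last_pos_alt arr
instance (arr : List Int) (out : Bool) : Decidable (Spec_swap_first_neg_last_pos arr out) := by unfold Spec_swap_first_neg_last_pos; infer_instance

-- ===== CLAIM (what is proved, stated in full; the proofs are below) =====
def Claim_equal_swap_first_neg_last_pos : Prop := ∀ (arr : List Int), Dom_swap_first_neg_last_pos arr → Spec_swap_first_neg_last_pos arr (swap_first_neg_last_pos arr)

-- ===== LEMMAS AND PROOFS =====
theorem pvFirstNeg_isSome (arr : List Int) (i : Nat) :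
    (pvFirstNeg arr i).isSome = (arr.drop i).any (fun x => decide (x < 0)) := by
  fun_induction pvFirstNeg arr i with
  | case1 i h hneg =>
    rw [List.drop_eq_getElem_cons h, List.any_cons]
    simp [hneg]
  | case2 i h hneg ih =>
    rw [ih, List.drop_eq_getElem_cons h, List.any_cons]
    simp [hneg]
  | case3 i h =>
    simp [List.drop_eq_nil_of_le (Nat.le_of_not_lt h)]

theorem pvLastPos_isSome (arr : List Int) (j : Nat) (hj : j ≤ arr.length) :
    (pvLastPos arr j).isSome = (arr.take j).any (fun x => decide (0 < x)) := by
  induction j with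
  | zero => simp [pvLastPos]
  | succ j ih =>
    have hlt : j < arr.length := hj
    rw [List.take_add_one, arr.getElem?_eq_getElem hlt]
    simp only [pvLastPos, List.getElem!_eq_getElem?_getD, arr.getElem?_eq_getElem hlt,
      Option.toList_some, List.any_append, List.any_cons, List.any_nil]
    by_cases hpos : (0:Int) < arr[j] <;>
      simp [hpos, ih (Nat.le_of_lt hlt), Bool.or_comm]

theorem pvFold_spec (l : List (Int × Int)) (st : Option Int × Option Int) :
    ((l.foldl pvStep st).1.isSome = (st.1.isSome || l.any (fun p => decide (p.2 < 0)))) ∧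
    ((l.foldl pvStep st).2.isSome = (st.2.isSome || l.any (fun p => decide (0 < p.2)))) := by
  induction l generalizing st with
  | nil => simp
  | cons p l ih =>
    simp only [List.foldl_cons, List.any_cons]
    rcases ih (pvStep st p) with ⟨h1, h2⟩
    constructor
    · rw [h1]
      cases hst : st.1 <;> by_cases hneg : p.2 < 0 <;>
        simp [pvStep, hst, hneg]
    · rw [h2]
      by_cases hpos : (0:Int) < p.2 <;> simp [pvStep, hpos]

theorem any_enumerate (arr : List Int) (g : Int → Bool) :
    (PySem.List.enumerate arr 0).any (fun p => g p.2) = arr.any g := by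
  conv_rhs => rw [← PySem.List.map_snd_enumerate (xs := arr) (s := 0)]
  rw [List.any_map]
  rfl

theorem any_enumerate_neg (arr : List Int) :
    ((PySem.List.enumerate arr 0).any fun p => decide (p.2 < 0)) = arr.any fun x => decide (x < 0) :=
  any_enumerate arr (fun x => decide (x < 0))


theorem any_enumerate_pos (arr : List Int) :
    ((PySem.List.enumerate arr 0).any fun p => decide (0 < p.2)) = arr.any fun x => decide (0 < x) :=
  any_enumerate arr (fun x => decide (0 < x))


-- ===== VERDICT (by name: the statement is the Claim_ definition above) =====
theorem swap_first_neg_last_pos_spec : Claim_equal_swap_first_neg_last_pos := by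
  intro arr _
  show swap_first_neg_last_pos arr = swap_first_neg_last_pos_alt arr
  rcases pvFold_spec (PySem.List.enumerate arr 0) (none, none) with ⟨h1, h2⟩
  simp only [swap_first_neg_last_pos, swap_first_neg_last_pos_alt, h1, h2,
    any_enumerate_neg, any_enumerate_pos, Option.isSome_none, Bool.false_or,
    pvFirstNeg_isSome, pvLastPos_isSome arr arr.length (le_refl _),
    List.drop_zero, List.take_length]
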